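-- pv_equiv track=rewrite | github.com/Muhmdk/Air-Traffic-Control | services/runway/app/domain/runway.py | conflicts_with_active
-- ===== SOURCE A (Python) =====
-- RUNWAY_CONFLICT_GROUPS: dict[str, str] = {
--     "RWY_05": "A", "RWY_23": "A",
--     "RWY_06L": "A", "RWY_24R": "A",
--     "RWY_06R": "A", "RWY_24L": "A",
--     "RWY_15L": "B", "RWY_33R": "B",
--     "RWY_15R": "B", "RWY_33L": "B",
-- }
--
-- def conflicts_with_active(runway_id: str, active_runways: set[str]) -> bool:
--     """Return True if runway_id conflicts with any currently active runway."""
--     my_group = RUNWAY_CONFLICT_GROUPS.get(runway_id)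
--     if my_group is None:
--         return False
--     for active_rwy in active_runways:
--         other_group = RUNWAY_CONFLICT_GROUPS.get(active_rwy)
--         if other_group is not None and other_group != my_group:
--             return True
--     return False
-- ===== SOURCE B (Python) =====
-- RUNWAY_CONFLICT_GROUPS: dict[str, str] = {
--     "RWY_05": "A", "RWY_23": "A",
--     "RWY_06L": "A", "RWY_24R": "A",
--     "RWY_06R": "A", "RWY_24L": "A",
--     "RWY_15L": "B", "RWY_33R": "B",
--     "RWY_15R": "B", "RWY_33L": "B",
-- }
--
-- # Precomputed adjacency: for each known runway, the frozenset of runways it conflicts with.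
-- CONFLICTS_WITH: dict[str, frozenset[str]] = {
--     r: frozenset(s for s, h in RUNWAY_CONFLICT_GROUPS.items() if h != g)
--     for r, g in RUNWAY_CONFLICT_GROUPS.items()
-- }
--
-- def conflicts_with_active(runway_id: str, active_runways: set[str]) -> bool:
--     """Return True if runway_id conflicts with any currently active runway."""
--     return not CONFLICTS_WITH.get(runway_id, frozenset()).isdisjoint(active_runways)
-- ===== Notes on version B (the rewrite author's own statement) =====
-- stated objective: alternative
-- what changed: Replaces the per-query scan that looks up each active runway's group with a precomputed inverted adjacency table (runway -> frozenset of conflicting runways) built once at module level; the query becomes a single set-disjointness test against the active runways with no group lookups at all.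
import Mathlib
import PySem

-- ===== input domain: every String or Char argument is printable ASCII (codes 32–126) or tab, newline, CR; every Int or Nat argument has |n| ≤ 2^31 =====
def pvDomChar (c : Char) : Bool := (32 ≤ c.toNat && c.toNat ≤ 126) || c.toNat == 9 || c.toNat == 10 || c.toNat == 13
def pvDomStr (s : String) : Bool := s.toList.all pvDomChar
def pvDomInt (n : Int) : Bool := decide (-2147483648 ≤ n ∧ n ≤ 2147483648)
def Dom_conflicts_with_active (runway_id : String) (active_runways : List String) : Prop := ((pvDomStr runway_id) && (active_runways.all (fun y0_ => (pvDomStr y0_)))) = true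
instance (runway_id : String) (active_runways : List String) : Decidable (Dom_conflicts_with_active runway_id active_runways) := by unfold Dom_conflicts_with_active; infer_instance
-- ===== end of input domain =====

-- B precomputes an inverted conflict-adjacency table (runway -> set of conflicting
-- runways) once, so the query is a single set-disjointness test with no group
-- lookups per active runway. Objective: alternative (different data structure).

-- ===== PORT A =====
def runwayConflictGroups : PySem.Dict String String :=
  PySem.Dict.ofList
  [("RWY_05", "A"), ("RWY_23", "A"),
   ("RWY_06L", "A"), ("RWY_24R", "A"),
   ("RWY_06R", "A"), ("RWY_24L", "A"),
   ("RWY_15L", "B"), ("RWY_33R", "B"),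
   ("RWY_15R", "B"), ("RWY_33L", "B")]

-- the for-loop of A with its early `return True`
def convScan (my_group : String) : List String → Bool
  | [] => false
  | active_rwy :: rest =>
    match PySem.Dict.get? runwayConflictGroups active_rwy with
    | some other_group => if other_group ≠ my_group then true else convScan my_group rest
    | none => convScan my_group rest

def conflicts_with_active (runway_id : String) (active_runways : List String) : Bool :=
  match PySem.Dict.get? runwayConflictGroups runway_id with
  | none => false
  | some my_group => convScan my_group active_runways

-- ===== PORT B =====
-- module-level dict comprehension: runway -> frozenset of runways it conflicts with
def conflictsWith : PySem.Dict String (PySem.Set String) :=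
  PySem.Dict.ofList ((runwayConflictGroups.items).map (fun p =>
    (p.1, PySem.Set.ofList ((runwayConflictGroups.items).filterMap
      (fun q => if q.2 ≠ p.2 then some q.1 else none)))))

def conflicts_with_active_alt (runway_id : String) (active_runways : List String) : Bool :=
  !(PySem.Set.isdisjoint (PySem.Dict.getD conflictsWith runway_id PySem.Set.empty) active_runways)

-- ===== PRECONDITION & SPEC =====
def Spec_conflicts_with_active (runway_id : String) (active_runways : List String) (out : Bool) : Prop := out = conflicts_with_active_alt runway_id active_runways
instance (runway_id : String) (active_runways : List String) (out : Bool) : Decidable (Spec_conflicts_with_active runway_id active_runways out) := by unfold Spec_conflicts_with_active; infer_instance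

-- ===== CLAIM (what is proved, stated in full; the proofs are below) =====
def Claim_equal_conflicts_with_active : Prop := ∀ (runway_id : String) (active_runways : List String), Dom_conflicts_with_active runway_id active_runways → Spec_conflicts_with_active runway_id active_runways (conflicts_with_active runway_id active_runways)

-- ===== LEMMAS AND PROOFS =====

-- the two adjacency rows of the precomputed table
def othersA : List String := ["RWY_15L", "RWY_33R", "RWY_15R", "RWY_33L"]
def othersB : List String := ["RWY_05", "RWY_23", "RWY_06L", "RWY_24R", "RWY_06R", "RWY_24L"]

theorem groups_mk : runwayConflictGroups = PySem.Dict.mk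
  [("RWY_05", "A"), ("RWY_23", "A"),
   ("RWY_06L", "A"), ("RWY_24R", "A"),
   ("RWY_06R", "A"), ("RWY_24L", "A"),
   ("RWY_15L", "B"), ("RWY_33R", "B"),
   ("RWY_15R", "B"), ("RWY_33L", "B")] := by decide

theorem cw_mk : conflictsWith = PySem.Dict.mk
  [("RWY_05", othersA), ("RWY_23", othersA),
   ("RWY_06L", othersA), ("RWY_24R", othersA),
   ("RWY_06R", othersA), ("RWY_24L", othersA),
   ("RWY_15L", othersB), ("RWY_33R", othersB),
   ("RWY_15R", othersB), ("RWY_33L", othersB)] := by decide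

-- every string falls in one of three lookup cases, and the two tables agree on them
set_option maxHeartbeats 1600000 in
theorem main_cases (r : String) :
    (PySem.Dict.get? runwayConflictGroups r = none ∧ PySem.Dict.get? conflictsWith r = none)
    ∨ (PySem.Dict.get? runwayConflictGroups r = some "A" ∧ PySem.Dict.get? conflictsWith r = some othersA)
    ∨ (PySem.Dict.get? runwayConflictGroups r = some "B" ∧ PySem.Dict.get? conflictsWith r = some othersB) := by
  rw [groups_mk, cw_mk]
  simp only [PySem.Dict.get?_mk_cons]
  split_ifs <;> simp_all [PySem.Dict.get?]

-- membership in a row characterises "has a group different from mine"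
theorem hS_A (r : String) :
    (∃ g', PySem.Dict.get? runwayConflictGroups r = some g' ∧ g' ≠ "A") ↔ r ∈ othersA := by
  rw [groups_mk]
  simp only [PySem.Dict.get?_mk_cons]
  split_ifs <;> simp_all [othersA, PySem.Dict.get?] <;>
    (and_intros <;> (intro h; subst h; simp_all))

theorem hS_B (r : String) :
    (∃ g', PySem.Dict.get? runwayConflictGroups r = some g' ∧ g' ≠ "B") ↔ r ∈ othersB := by
  rw [groups_mk]
  simp only [PySem.Dict.get?_mk_cons]
  split_ifs <;> simp_all [othersB, PySem.Dict.get?] <;>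
    (and_intros <;> (intro h; subst h; simp_all))

-- A's scan returns true iff some active runway has a group differing from my_group
theorem convScan_eq_true_iff (my_group : String) (l : List String) :
    convScan my_group l = true ↔
      ∃ r ∈ l, ∃ g, PySem.Dict.get? runwayConflictGroups r = some g ∧ g ≠ my_group := by
  induction l with
  | nil => simp [convScan]
  | cons r rest ih =>
    cases h : PySem.Dict.get? runwayConflictGroups r with
    | none => simp [convScan, h, ih]
    | some g =>
      by_cases hg : g = my_group
      · subst hg; simp [convScan, h, ih]
      · simp [convScan, h, hg]

-- the scan equals the disjointness test against the corresponding adjacency row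
theorem scan_vs (g : String) (S : List String)
    (hS : ∀ r, (∃ g', PySem.Dict.get? runwayConflictGroups r = some g' ∧ g' ≠ g) ↔ r ∈ S)
    (act : List String) : convScan g act = !(PySem.Set.isdisjoint S act) := by
  rw [Bool.eq_iff_iff, convScan_eq_true_iff, Bool.not_eq_true', ← Bool.not_eq_true]
  rw [PySem.Set.isdisjoint_iff]
  push Not
  constructor
  · rintro ⟨r, hr, hex⟩; exact ⟨r, (hS r).1 hex, hr⟩
  · rintro ⟨x, hx, hxa⟩; exact ⟨x, hxa, (hS x).2 hx⟩

-- ===== VERDICT (by name: the statement is the Claim_ definition above) =====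
theorem conflicts_with_active_spec : Claim_equal_conflicts_with_active := by
  intro runway_id active_runways _
  unfold Spec_conflicts_with_active conflicts_with_active conflicts_with_active_alt
  rcases main_cases runway_id with ⟨hg, hc⟩ | ⟨hg, hc⟩ | ⟨hg, hc⟩ <;>
    rw [hg, PySem.Dict.getD_eq_get?_getD, hc]
  · simp [PySem.Set.isdisjoint, PySem.Set.empty]
  · exact scan_vs "A" othersA hS_A active_runways
  · exact scan_vs "B" othersB hS_B active_runways
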